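-- pv_equiv track=rewrite | github.com/pypi-data/pypi-mirror-21 | packages/linguistica/linguistica-5.2.0-py2.py3-none-any.whl/linguistica/manifold_module.py | compute_WordToSharedContextsOfNeighbors
-- ===== SOURCE A (Python) =====
-- def compute_WordToSharedContextsOfNeighbors(analyzedwordlist, WordToContexts,
--         WordToNeighbors, ContextToWords, mincontexts):
--
--     WordToSharedContextsOfNeighbors = dict()
--
--     for word in analyzedwordlist:
--         WordToSharedContextsOfNeighbors[word] = dict()
--
--         neighbors = WordToNeighbors[word] # list of neighbor indices
--
--         for context in WordToContexts[word].keys():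
--             WordToSharedContextsOfNeighbors[word][context] = list()
--
--             for neighbor in neighbors:
--                 if neighbor in ContextToWords[context]:
--                     WordToSharedContextsOfNeighbors[word][context].append(neighbor)
--
--             if len(WordToSharedContextsOfNeighbors[word][context]) < mincontexts:
--                 del WordToSharedContextsOfNeighbors[word][context]
--
--     ImportantContextToWords = dict()
--     for word in analyzedwordlist:
--         for context in WordToSharedContextsOfNeighbors[word].keys():
--             CountOfThisWordInThisContext = ContextToWords[context][word]
--             if CountOfThisWordInThisContext >= mincontexts:
--                 if context not in ImportantContextToWords:
--                     ImportantContextToWords[context] = dict()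
--                 ImportantContextToWords[context][word] = CountOfThisWordInThisContext
--
--     return (WordToSharedContextsOfNeighbors, ImportantContextToWords)
-- ===== SOURCE B (Python) =====
-- def compute_WordToSharedContextsOfNeighbors(analyzedwordlist, WordToContexts,
--         WordToNeighbors, ContextToWords, mincontexts):
--     # Different algorithm: invert ContextToWords once into word -> [contexts],
--     # then for each analyzed word bucket its neighbors by context through that
--     # inverted index (neighbors outer, their contexts inner) instead of A's
--     # per-context membership scan over the neighbor list.
--     contexts_of = dict()
--     for context, wordcounts in ContextToWords.items():
--         for w in wordcounts:
--             contexts_of.setdefault(w, []).append(context)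
--
--     WordToSharedContextsOfNeighbors = dict()
--     ImportantContextToWords = dict()
--     for word in analyzedwordlist:
--         shared_by_context = dict()
--         for n in WordToNeighbors[word]:
--             for c in contexts_of.get(n, ()):
--                 shared_by_context.setdefault(c, []).append(n)
--         per_word = dict()
--         for context in WordToContexts[word]:
--             shared = shared_by_context.get(context, [])
--             if len(shared) >= mincontexts:
--                 per_word[context] = shared
--         WordToSharedContextsOfNeighbors[word] = per_word
--         for context in per_word:
--             count = ContextToWords[context][word]
--             if count >= mincontexts:
--                 ImportantContextToWords.setdefault(context, dict())[word] = count
--     return (WordToSharedContextsOfNeighbors, ImportantContextToWords)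
-- ===== Notes on version B (the rewrite author's own statement) =====
-- stated objective: alternative
-- what changed: B inverts ContextToWords once into a word->contexts index and, per analyzed word, buckets neighbors by context through that index (neighbors-outer loop interchange) instead of A's per-context membership scan over the neighbor list, populating both result dicts in one pass.
import Mathlib
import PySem

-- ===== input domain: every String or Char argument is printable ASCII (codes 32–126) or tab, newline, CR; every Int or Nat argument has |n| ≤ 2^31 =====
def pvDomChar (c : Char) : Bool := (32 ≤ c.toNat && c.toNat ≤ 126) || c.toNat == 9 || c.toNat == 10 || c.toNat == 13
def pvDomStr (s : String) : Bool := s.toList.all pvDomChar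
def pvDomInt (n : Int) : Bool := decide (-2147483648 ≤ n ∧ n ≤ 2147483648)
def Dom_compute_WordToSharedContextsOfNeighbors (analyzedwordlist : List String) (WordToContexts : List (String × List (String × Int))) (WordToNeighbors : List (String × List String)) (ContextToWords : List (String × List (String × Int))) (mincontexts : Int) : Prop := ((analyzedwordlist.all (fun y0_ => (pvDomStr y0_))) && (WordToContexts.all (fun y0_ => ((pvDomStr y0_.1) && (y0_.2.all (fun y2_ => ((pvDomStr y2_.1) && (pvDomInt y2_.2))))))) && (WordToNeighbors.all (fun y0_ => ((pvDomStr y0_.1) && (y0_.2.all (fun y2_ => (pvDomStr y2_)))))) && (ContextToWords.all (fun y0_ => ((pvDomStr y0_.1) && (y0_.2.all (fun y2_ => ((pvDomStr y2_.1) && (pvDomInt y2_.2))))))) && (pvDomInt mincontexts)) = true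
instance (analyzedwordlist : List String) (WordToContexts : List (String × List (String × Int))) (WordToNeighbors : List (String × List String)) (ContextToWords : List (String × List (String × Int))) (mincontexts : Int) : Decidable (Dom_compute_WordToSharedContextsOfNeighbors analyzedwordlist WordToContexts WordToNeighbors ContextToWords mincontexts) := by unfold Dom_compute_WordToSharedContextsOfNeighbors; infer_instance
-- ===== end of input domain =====

-- B inverts ContextToWords into a word→contexts index and buckets each word's neighbors by context
-- through it (loop interchange), instead of A's per-context membership scan; same return value.

-- ===== PORT A =====
-- shared input conversion: a Python dict[str, dict[str, int]] argument arrives as an association list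
def pvToDict2 (l : List (String × List (String × Int))) : PySem.Dict String (PySem.Dict String Int) :=
  PySem.Dict.ofList (l.map (fun p => (p.1, PySem.Dict.ofList p.2)))

-- A's first-pass body for one word: insert an empty list per context, append the neighbors found in
-- ContextToWords[context], delete the context again if fewer than mincontexts were collected.
-- (getD defaults are only reachable outside Pre_, where the Python raises KeyError.)
def pvInnerA (wtc ctw : PySem.Dict String (PySem.Dict String Int))
    (wtn : PySem.Dict String (List String)) (mincontexts : Int) (word : String) :
    PySem.Dict String (List String) :=
  let neighbors := wtn.getD word []
  (wtc.getD word PySem.Dict.empty).keys.foldl (fun d context =>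
    let d := d.insert context []
    let d := neighbors.foldl (fun d neighbor =>
      if (ctw.getD context PySem.Dict.empty).contains neighbor
      then d.insert context (d.getD context [] ++ [neighbor]) else d) d
    if ((d.getD context []).length : Int) < mincontexts then d.erase context else d)
    PySem.Dict.empty

-- A's second-pass body for one (word, context): explicit 'if context not in dict: dict[context] = {}'
def pvImpA (ctw : PySem.Dict String (PySem.Dict String Int)) (mincontexts : Int) (word : String)
    (I : PySem.Dict String (PySem.Dict String Int)) (context : String) :
    PySem.Dict String (PySem.Dict String Int) :=
  let c := (ctw.getD context PySem.Dict.empty).getD word 0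
  if mincontexts ≤ c then
    let I' := if I.contains context then I else I.insert context PySem.Dict.empty
    I'.insert context ((I'.getD context PySem.Dict.empty).insert word c)
  else I

def compute_WordToSharedContextsOfNeighbors (analyzedwordlist : List String) (WordToContexts : List (String × List (String × Int))) (WordToNeighbors : List (String × List String)) (ContextToWords : List (String × List (String × Int))) (mincontexts : Int) : (List (String × List (String × List String))) × (List (String × List (String × Int))) :=
  let wtc := pvToDict2 WordToContexts
  let wtn := PySem.Dict.ofList WordToNeighbors
  let ctw := pvToDict2 ContextToWords
  -- first full scan over analyzedwordlist: WordToSharedContextsOfNeighbors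
  let W : PySem.Dict String (PySem.Dict String (List String)) :=
    analyzedwordlist.foldl (fun W word =>
      W.insert word (pvInnerA wtc ctw wtn mincontexts word)) PySem.Dict.empty
  -- second full scan over analyzedwordlist: ImportantContextToWords
  let I : PySem.Dict String (PySem.Dict String Int) :=
    analyzedwordlist.foldl (fun I word =>
      (W.getD word PySem.Dict.empty).keys.foldl (pvImpA ctw mincontexts word) I) PySem.Dict.empty
  (W.items.map (fun p => (p.1, p.2.items)), I.items.map (fun p => (p.1, p.2.items)))

-- ===== PORT B =====
-- B's inverted index: word -> list of the contexts (in ContextToWords order) whose dict contains it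
-- (contexts_of.setdefault(w, []).append(context) is Dict.modify w [] (· ++ [context]))
def pvInvIdx (ctw : PySem.Dict String (PySem.Dict String Int)) : PySem.Dict String (List String) :=
  ctw.items.foldl (fun m p =>
    p.2.keys.foldl (fun m w => m.modify w [] (· ++ [p.1])) m) PySem.Dict.empty

-- B's neighbor bucketing: shared_by_context.setdefault(c, []).append(n) for every context of n
def pvAccB (inv : PySem.Dict String (List String)) (neighbors : List String) :
    PySem.Dict String (List String) :=
  neighbors.foldl (fun acc n =>
    (inv.getD n []).foldl (fun acc c => acc.modify c [] (· ++ [n])) acc) PySem.Dict.empty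

-- B's per-word dict read off the buckets, in WordToContexts[word] key order
def pvPerWordB (wtc : PySem.Dict String (PySem.Dict String Int))
    (inv : PySem.Dict String (List String)) (wtn : PySem.Dict String (List String))
    (mincontexts : Int) (word : String) : PySem.Dict String (List String) :=
  let acc := pvAccB inv (wtn.getD word [])
  (wtc.getD word PySem.Dict.empty).keys.foldl (fun d context =>
    let shared := acc.getD context []
    if mincontexts ≤ (shared.length : Int) then d.insert context shared else d)
    PySem.Dict.empty

-- B's important-context step: ImportantContextToWords.setdefault(context, {})[word] = count
def pvImpB (ctw : PySem.Dict String (PySem.Dict String Int)) (mincontexts : Int) (word : String)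
    (I : PySem.Dict String (PySem.Dict String Int)) (context : String) :
    PySem.Dict String (PySem.Dict String Int) :=
  let count := (ctw.getD context PySem.Dict.empty).getD word 0
  if mincontexts ≤ count then
    let I' := I.setdefault context PySem.Dict.empty
    I'.insert context ((I'.getD context PySem.Dict.empty).insert word count)
  else I

def compute_WordToSharedContextsOfNeighbors_alt (analyzedwordlist : List String) (WordToContexts : List (String × List (String × Int))) (WordToNeighbors : List (String × List String)) (ContextToWords : List (String × List (String × Int))) (mincontexts : Int) : (List (String × List (String × List String))) × (List (String × List (String × Int))) :=
  let wtc := pvToDict2 WordToContexts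
  let wtn := PySem.Dict.ofList WordToNeighbors
  let ctw := pvToDict2 ContextToWords
  let inv := pvInvIdx ctw
  -- single pass over analyzedwordlist carrying both result dicts
  let r :=
    analyzedwordlist.foldl (fun s word =>
      let perWord := pvPerWordB wtc inv wtn mincontexts word
      (s.1.insert word perWord, perWord.keys.foldl (pvImpB ctw mincontexts word) s.2))
      ((PySem.Dict.empty : PySem.Dict String (PySem.Dict String (List String))),
       (PySem.Dict.empty : PySem.Dict String (PySem.Dict String Int)))
  (r.1.items.map (fun p => (p.1, p.2.items)), r.2.items.map (fun p => (p.1, p.2.items)))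

-- ===== PRECONDITION & SPEC =====
-- Pre_ holds exactly where the Python A returns normally: every analyzed word is a key of both
-- WordToContexts and WordToNeighbors; each of its contexts is a key of ContextToWords whenever the
-- word's neighbor list is non-empty (the membership test then evaluates ContextToWords[context]);
-- and for each SURVIVING context (at least mincontexts shared neighbors) ContextToWords[context]
-- exists and contains the word itself (pass 2 reads ContextToWords[context][word]).
-- Outside Pre_ A raises KeyError.
def Pre_compute_WordToSharedContextsOfNeighbors (analyzedwordlist : List String) (WordToContexts : List (String × List (String × Int))) (WordToNeighbors : List (String × List String)) (ContextToWords : List (String × List (String × Int))) (mincontexts : Int) : Prop :=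
  ∀ word ∈ analyzedwordlist,
    (PySem.Dict.ofList (WordToContexts.map (fun p => (p.1, PySem.Dict.ofList p.2)))).contains word = true ∧
    (PySem.Dict.ofList WordToNeighbors).contains word = true ∧
    ∀ context ∈ ((PySem.Dict.ofList (WordToContexts.map (fun p => (p.1, PySem.Dict.ofList p.2)))).getD word PySem.Dict.empty).keys,
      (((PySem.Dict.ofList WordToNeighbors).getD word [] ≠ []) →
        (PySem.Dict.ofList (ContextToWords.map (fun p => (p.1, PySem.Dict.ofList p.2)))).contains context = true) ∧
      (mincontexts ≤ ((((PySem.Dict.ofList WordToNeighbors).getD word []).filter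
            (fun n => ((PySem.Dict.ofList (ContextToWords.map (fun p => (p.1, PySem.Dict.ofList p.2)))).getD context PySem.Dict.empty).contains n)).length : Int) →
        (PySem.Dict.ofList (ContextToWords.map (fun p => (p.1, PySem.Dict.ofList p.2)))).contains context = true ∧
        ((PySem.Dict.ofList (ContextToWords.map (fun p => (p.1, PySem.Dict.ofList p.2)))).getD context PySem.Dict.empty).contains word = true)
instance (analyzedwordlist : List String) (WordToContexts : List (String × List (String × Int))) (WordToNeighbors : List (String × List String)) (ContextToWords : List (String × List (String × Int))) (mincontexts : Int) : Decidable (Pre_compute_WordToSharedContextsOfNeighbors analyzedwordlist WordToContexts WordToNeighbors ContextToWords mincontexts) := by unfold Pre_compute_WordToSharedContextsOfNeighbors; infer_instance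

def pvWitness_compute_WordToSharedContextsOfNeighbors : List String × (List (String × List (String × Int))) × (List (String × List String)) × (List (String × List (String × Int))) × Int :=
  (["a"], [("a", [("c", 2)])], [("a", ["b"])], [("c", [("a", 3), ("b", 1)])], 1)

def Spec_compute_WordToSharedContextsOfNeighbors (analyzedwordlist : List String) (WordToContexts : List (String × List (String × Int))) (WordToNeighbors : List (String × List String)) (ContextToWords : List (String × List (String × Int))) (mincontexts : Int) (out : (List (String × List (String × List String))) × (List (String × List (String × Int)))) : Prop := out = compute_WordToSharedContextsOfNeighbors_alt analyzedwordlist WordToContexts WordToNeighbors ContextToWords mincontexts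
instance (analyzedwordlist : List String) (WordToContexts : List (String × List (String × Int))) (WordToNeighbors : List (String × List String)) (ContextToWords : List (String × List (String × Int))) (mincontexts : Int) (out : (List (String × List (String × List String))) × (List (String × List (String × Int)))) : Decidable (Spec_compute_WordToSharedContextsOfNeighbors analyzedwordlist WordToContexts WordToNeighbors ContextToWords mincontexts out) := by unfold Spec_compute_WordToSharedContextsOfNeighbors; infer_instance

-- ===== CLAIM (what is proved, stated in full; the proofs are below) =====
def Claim_equal_compute_WordToSharedContextsOfNeighbors : Prop := ∀ (analyzedwordlist : List String) (WordToContexts : List (String × List (String × Int))) (WordToNeighbors : List (String × List String)) (ContextToWords : List (String × List (String × Int))) (mincontexts : Int), Dom_compute_WordToSharedContextsOfNeighbors analyzedwordlist WordToContexts WordToNeighbors ContextToWords mincontexts → Pre_compute_WordToSharedContextsOfNeighbors analyzedwordlist WordToContexts WordToNeighbors ContextToWords mincontexts → Spec_compute_WordToSharedContextsOfNeighbors analyzedwordlist WordToContexts WordToNeighbors ContextToWords mincontexts (compute_WordToSharedContextsOfNeighbors analyzedwordlist WordToContexts WordToNeighbors ContextToWords mincontexts)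

-- ===== LEMMAS AND PROOFS =====

-- erasing a key that was only just inserted into a dict not containing it restores the dict
theorem pv_erase_insert_fresh {ν : Type} (d : PySem.Dict String ν) (k : String) (v : ν)
    (h : d.contains k = false) : (d.insert k v).erase k = d := by
  have h' : ∀ p ∈ d.items, ¬ (p.1 == k) = true := by
    simpa [PySem.Dict.contains, List.any_eq_false] using h
  apply PySem.Dict.ext
  simp [PySem.Dict.insert, PySem.Dict.erase, h, List.filter_append]
  intro a b hab
  simpa using h' (a, b) hab

-- A's append loop over neighbors builds exactly the filtered neighbor list under the key
theorem pv_append_fold (ctw : PySem.Dict String (PySem.Dict String Int)) (c : String)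
    (d : PySem.Dict String (List String)) :
    ∀ (ns : List String) (acc : List String),
      ns.foldl (fun d n => if (ctw.getD c PySem.Dict.empty).contains n
          then d.insert c (d.getD c [] ++ [n]) else d) (d.insert c acc)
        = d.insert c (acc ++ ns.filter (fun n => (ctw.getD c PySem.Dict.empty).contains n)) := by
  intro ns
  induction ns with
  | nil => intro acc; simp
  | cons n ns ih =>
    intro acc
    by_cases hn : (ctw.getD c PySem.Dict.empty).contains n = true
    · simp only [List.foldl_cons, hn, if_pos, PySem.Dict.getD_insert_self,
        PySem.Dict.insert_insert_self]
      rw [ih (acc ++ [n])]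
      simp [hn]
    · simp only [List.foldl_cons, if_neg hn]
      rw [ih acc]
      simp [hn]

-- A's insert/append/maybe-delete loop equals the direct filtered construction, on Nodup context keys
theorem pv_inner_eq_aux (ctw : PySem.Dict String (PySem.Dict String Int))
    (wtn : PySem.Dict String (List String)) (mincontexts : Int) (word : String) :
    ∀ (ks : List String) (d : PySem.Dict String (List String)), ks.Nodup →
      (∀ c ∈ ks, d.contains c = false) →
      ks.foldl (fun d context =>
        let d := d.insert context []
        let d := (wtn.getD word []).foldl (fun d neighbor =>
          if (ctw.getD context PySem.Dict.empty).contains neighbor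
          then d.insert context (d.getD context [] ++ [neighbor]) else d) d
        if ((d.getD context []).length : Int) < mincontexts then d.erase context else d) d
      = ks.foldl (fun d context =>
        let shared := (wtn.getD word []).filter (fun n => (ctw.getD context PySem.Dict.empty).contains n)
        if mincontexts ≤ (shared.length : Int) then d.insert context shared else d) d := by
  intro ks
  induction ks with
  | nil => intro d _ _; rfl
  | cons c ks ih =>
    intro d hnd hcont
    have hdc : d.contains c = false := hcont c List.mem_cons_self
    have h1 := pv_append_fold ctw c d (wtn.getD word []) []
    simp only [List.nil_append] at h1
    simp only [List.foldl_cons, h1, PySem.Dict.getD_insert_self]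
    by_cases hlt : (((wtn.getD word []).filter
        (fun n => (ctw.getD c PySem.Dict.empty).contains n)).length : Int) < mincontexts
    · rw [if_pos hlt, if_neg (by omega), pv_erase_insert_fresh _ _ _ hdc]
      exact ih d hnd.of_cons (fun c' hc' => hcont c' (List.mem_cons_of_mem _ hc'))
    · rw [if_neg hlt, if_pos (by omega)]
      refine ih _ hnd.of_cons (fun c' hc' => ?_)
      rw [PySem.Dict.contains_insert]
      have hne : c' ≠ c := fun h => (List.nodup_cons.mp hnd).1 (h ▸ hc')
      simp [hne, hcont c' (List.mem_cons_of_mem _ hc')]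

-- every value stored in a dict built by update carries over from the pair list (or the base dict)
theorem pv_mem_values_update {κ ν : Type} [BEq κ] [LawfulBEq κ] :
    ∀ (ps : List (κ × ν)) (d : PySem.Dict κ ν) (v : ν),
      v ∈ (d.update ps).values → v ∈ d.values ∨ v ∈ ps.map Prod.snd := by
  intro ps
  induction ps with
  | nil => intro d v h; exact Or.inl (by simpa [PySem.Dict.update] using h)
  | cons p ps ih =>
    intro d v h
    have h' : v ∈ ((d.insert p.1 p.2).update ps).values := by
      simpa [PySem.Dict.update] using h
    rcases ih _ _ h' with h2 | h2
    · rcases PySem.Dict.mem_values_insert _ _ _ _ h2 with h3 | h3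
      · exact Or.inr (by simp [h3])
      · exact Or.inl h3
    · exact Or.inr (by simp; right; simpa using h2)

-- every value of a converted dict-of-dicts argument has Nodup keys
theorem pv_value_nodup (l : List (String × List (String × Int))) (v : PySem.Dict String Int)
    (hv : v ∈ (pvToDict2 l).values) : v.keys.Nodup := by
  have := pv_mem_values_update (l.map (fun p => (p.1, PySem.Dict.ofList p.2)))
    PySem.Dict.empty v (by simpa [pvToDict2, PySem.Dict.ofList] using hv)
  rcases this with h2 | h2
  · simp [PySem.Dict.empty, PySem.Dict.values] at h2
  · rcases List.mem_map.mp h2 with ⟨q, hq, hqv⟩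
    rcases List.mem_map.mp hq with ⟨r, hr, hrq⟩
    subst hrq
    simp only at hqv
    subst hqv
    exact PySem.Dict.nodup_keys_ofList _

-- every inner dict obtained by getD from a converted dict-of-dicts argument has Nodup keys
theorem pv_nodup_getD2 (l : List (String × List (String × Int))) (w : String) :
    ((pvToDict2 l).getD w PySem.Dict.empty).keys.Nodup := by
  cases h : (pvToDict2 l).get? w with
  | none => rw [PySem.Dict.getD_of_get?_eq_none _ _ h]; simp
  | some v =>
    rw [PySem.Dict.getD_of_get?_eq_some _ _ h]
    refine pv_value_nodup l v ?_
    simp only [PySem.Dict.get?] at h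
    rcases Option.map_eq_some_iff.mp h with ⟨p, hp, hpv⟩
    have := List.mem_of_find?_eq_some hp
    simp only [PySem.Dict.values]
    exact List.mem_map.mpr ⟨p, this, hpv⟩

-- one bucket-append pass over a context list, read back at one key
theorem pv_bucket_getD (x k : String) :
    ∀ (cs : List String) (d : PySem.Dict String (List String)),
      (cs.foldl (fun d c => d.modify c [] (· ++ [x])) d).getD k []
        = d.getD k [] ++ (cs.filter (fun c => c == k)).map (fun _ => x) := by
  intro cs
  induction cs with
  | nil => intro d; simp
  | cons c cs ih =>
    intro d
    simp only [List.foldl_cons, List.filter_cons]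
    rw [ih]
    by_cases hck : c = k
    · subst hck
      simp [PySem.Dict.getD_modify_self]
    · have : (c == k) = false := by simp [hck]
      simp [this, PySem.Dict.getD_modify_of_ne d [] (· ++ [x]) (Ne.symm hck)]

-- on a Nodup list, filtering for one key keeps at most that one element
theorem pv_filter_beq_of_nodup (cs : List String) (h : cs.Nodup) (k : String) :
    cs.filter (fun c => c == k) = if k ∈ cs then [k] else [] := by
  induction cs with
  | nil => simp
  | cons c cs ih =>
    simp only [List.filter_cons]
    by_cases hck : c = k
    · subst hck
      have : c ∉ cs := (List.nodup_cons.mp h).1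
      simp [ih (List.nodup_cons.mp h).2, this]
    · have hne : (c == k) = false := by simp [hck]
      simp [hne, ih (List.nodup_cons.mp h).2, Ne.symm hck]

-- closed form for the inverted index: the contexts whose dict contains n, in order
theorem pv_inv_fold_getD :
    ∀ (ps : List (String × PySem.Dict String Int)), (∀ p ∈ ps, p.2.keys.Nodup) →
      ∀ (m : PySem.Dict String (List String)) (n : String),
      (ps.foldl (fun m p => p.2.keys.foldl (fun m w => m.modify w [] (· ++ [p.1])) m) m).getD n []
        = m.getD n [] ++ (ps.filter (fun p => p.2.contains n)).map (·.1) := by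
  intro ps
  induction ps with
  | nil => intro _ m n; simp
  | cons p ps ih =>
    intro hnd m n
    simp only [List.foldl_cons, List.filter_cons]
    rw [ih (fun q hq => hnd q (List.mem_cons_of_mem _ hq))]
    rw [pv_bucket_getD p.1 n p.2.keys m]
    rw [pv_filter_beq_of_nodup p.2.keys (hnd p List.mem_cons_self) n]
    by_cases hc : p.2.contains n = true
    · have hm : n ∈ p.2.keys := (PySem.Dict.contains_iff_mem_keys _ _).mp hc
      simp [hc, hm]
    · have hm : n ∉ p.2.keys := fun h => hc ((PySem.Dict.contains_iff_mem_keys _ _).mpr h)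
      simp [hc, hm]

theorem pv_invIdx_getD (CtW : List (String × List (String × Int))) (n : String) :
    (pvInvIdx (pvToDict2 CtW)).getD n []
      = ((pvToDict2 CtW).items.filter (fun p => p.2.contains n)).map (·.1) := by
  unfold pvInvIdx
  rw [pv_inv_fold_getD _ ?hv PySem.Dict.empty n]
  · simp
  case hv =>
    intro p hp
    refine pv_value_nodup CtW p.2 ?_
    simp only [PySem.Dict.values]
    exact List.mem_map.mpr ⟨p, hp, rfl⟩

-- the inverted index lists are Nodup (sublists of the Nodup context-key list)
theorem pv_invIdx_nodup (CtW : List (String × List (String × Int))) (n : String) :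
    ((pvInvIdx (pvToDict2 CtW)).getD n []).Nodup := by
  rw [pv_invIdx_getD]
  have hkeys : ((pvToDict2 CtW).items.map (·.1)).Nodup := by
    have := PySem.Dict.nodup_keys_ofList (CtW.map (fun p => (p.1, PySem.Dict.ofList p.2)))
    simpa [pvToDict2, PySem.Dict.keys] using this
  exact hkeys.sublist (List.Sublist.map _ List.filter_sublist)

-- membership in a word's inverted-index list is exactly the membership test A performs
theorem pv_mem_invIdx (CtW : List (String × List (String × Int))) (c n : String) :
    c ∈ (pvInvIdx (pvToDict2 CtW)).getD n []
      ↔ ((pvToDict2 CtW).getD c PySem.Dict.empty).contains n = true := by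
  rw [pv_invIdx_getD]
  have hkeys : ((pvToDict2 CtW)).keys.Nodup := by
    simp [pvToDict2, PySem.Dict.nodup_keys_ofList]
  constructor
  · intro h
    rcases List.mem_map.mp h with ⟨p, hp, hpc⟩
    rcases List.mem_filter.mp hp with ⟨hpi, hpn⟩
    have : (c, p.2) ∈ (pvToDict2 CtW).items := by
      have : p = (c, p.2) := by cases p; simp_all
      rwa [this] at hpi
    rw [PySem.Dict.getD_of_mem_items _ this hkeys PySem.Dict.empty]
    simpa using hpn
  · intro h
    by_cases hcc : (pvToDict2 CtW).contains c = true
    · have hs : ((pvToDict2 CtW).get? c).isSome = true := by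
        rw [← PySem.Dict.contains_eq_isSome_get? (pvToDict2 CtW) c]; exact hcc
      rcases Option.isSome_iff_exists.mp hs with ⟨v, hv⟩
      have hmem := PySem.Dict.mem_items_of_get?_eq_some _ hv
      have hgd : (pvToDict2 CtW).getD c PySem.Dict.empty = v :=
        PySem.Dict.getD_of_get?_eq_some _ _ hv
      refine List.mem_map.mpr ⟨(c, v), List.mem_filter.mpr ⟨hmem, ?_⟩, rfl⟩
      simpa [hgd] using h
    · have : (pvToDict2 CtW).getD c PySem.Dict.empty = PySem.Dict.empty :=
        PySem.Dict.getD_of_not_contains _ _ (by simpa using hcc)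
      rw [this] at h
      simp [PySem.Dict.contains_empty] at h

-- B's bucketing pass read back at one context gives exactly A's filtered neighbor list
theorem pv_acc_getD_aux (CtW : List (String × List (String × Int))) (c : String) :
    ∀ (ns : List String) (acc : PySem.Dict String (List String)),
      (ns.foldl (fun acc n =>
          ((pvInvIdx (pvToDict2 CtW)).getD n []).foldl
            (fun acc c' => acc.modify c' [] (· ++ [n])) acc) acc).getD c []
        = acc.getD c []
          ++ ns.filter (fun n => ((pvToDict2 CtW).getD c PySem.Dict.empty).contains n) := by
  intro ns
  induction ns with
  | nil => intro acc; simp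
  | cons n ns ih =>
    intro acc
    simp only [List.foldl_cons, List.filter_cons]
    rw [ih]
    rw [pv_bucket_getD n c _ acc]
    rw [pv_filter_beq_of_nodup _ (pv_invIdx_nodup CtW n) c]
    by_cases h : ((pvToDict2 CtW).getD c PySem.Dict.empty).contains n = true
    · have hm : c ∈ (pvInvIdx (pvToDict2 CtW)).getD n [] := (pv_mem_invIdx CtW c n).mpr h
      simp [h, hm]
    · have hm : c ∉ (pvInvIdx (pvToDict2 CtW)).getD n [] :=
        fun hm => h ((pv_mem_invIdx CtW c n).mp hm)
      simp [h, hm]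

theorem pv_acc_getD (CtW : List (String × List (String × Int))) (ns : List String) (c : String) :
    (pvAccB (pvInvIdx (pvToDict2 CtW)) ns).getD c []
      = ns.filter (fun n => ((pvToDict2 CtW).getD c PySem.Dict.empty).contains n) := by
  unfold pvAccB
  rw [pv_acc_getD_aux CtW c ns PySem.Dict.empty]
  simp

-- A's per-word dict IS B's per-word dict
theorem pv_inner_eq (WtC CtW : List (String × List (String × Int)))
    (wtn : PySem.Dict String (List String)) (mincontexts : Int) (word : String) :
    pvInnerA (pvToDict2 WtC) (pvToDict2 CtW) wtn mincontexts word
      = pvPerWordB (pvToDict2 WtC) (pvInvIdx (pvToDict2 CtW)) wtn mincontexts word := by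
  have h1 := pv_inner_eq_aux (pvToDict2 CtW) wtn mincontexts word
    ((pvToDict2 WtC).getD word PySem.Dict.empty).keys PySem.Dict.empty
    (pv_nodup_getD2 WtC word) (by intro c _; simp)
  have h2 : (fun (d : PySem.Dict String (List String)) context =>
        let shared := (wtn.getD word []).filter
          (fun n => ((pvToDict2 CtW).getD context PySem.Dict.empty).contains n)
        if mincontexts ≤ (shared.length : Int) then d.insert context shared else d)
      = (fun (d : PySem.Dict String (List String)) context =>
        let shared := (pvAccB (pvInvIdx (pvToDict2 CtW)) (wtn.getD word [])).getD context []
        if mincontexts ≤ (shared.length : Int) then d.insert context shared else d) := by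
    funext d context
    rw [pv_acc_getD CtW (wtn.getD word []) context]
  show pvInnerA (pvToDict2 WtC) (pvToDict2 CtW) wtn mincontexts word
      = ((pvToDict2 WtC).getD word PySem.Dict.empty).keys.foldl (fun d context =>
          let shared := (pvAccB (pvInvIdx (pvToDict2 CtW)) (wtn.getD word [])).getD context []
          if mincontexts ≤ (shared.length : Int) then d.insert context shared else d)
          PySem.Dict.empty
  rw [← h2]
  exact h1

-- A's important-context step (explicit membership test) equals B's setdefault step
theorem pv_imp_step_eq (ctw : PySem.Dict String (PySem.Dict String Int)) (mincontexts : Int) (word : String) :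
    pvImpA ctw mincontexts word = pvImpB ctw mincontexts word := by
  funext I context
  unfold pvImpA pvImpB
  by_cases hc : I.contains context = true
  · simp [hc, PySem.Dict.setdefault_of_contains _ _ hc]
  · simp [hc, PySem.Dict.setdefault_of_not_contains _ _ (by simpa using hc)]

-- looking a word up in the finished first-pass dict gives its (recomputed) per-word dict
theorem pv_getD_foldl_insert_not_mem {ν : Type} (f : String → ν) :
    ∀ (xs : List String) (d : PySem.Dict String ν) (w : String) (dflt : ν), w ∉ xs →
      (xs.foldl (fun W x => W.insert x (f x)) d).getD w dflt = d.getD w dflt := by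
  intro xs
  induction xs with
  | nil => intro d w dflt _; rfl
  | cons x xs ih =>
    intro d w dflt hw
    simp only [List.foldl_cons]
    rw [ih _ _ _ (by intro h; exact hw (List.mem_cons_of_mem _ h))]
    exact PySem.Dict.getD_insert_of_ne _ _ _ (by intro h; exact hw (h ▸ List.mem_cons_self))

theorem pv_getD_foldl_insert {ν : Type} (f : String → ν) :
    ∀ (xs : List String) (d : PySem.Dict String ν) (w : String) (dflt : ν), w ∈ xs →
      (xs.foldl (fun W x => W.insert x (f x)) d).getD w dflt = f w := by
  intro xs
  induction xs with
  | nil => intro _ _ _ h; cases h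
  | cons x xs ih =>
    intro d w dflt hw
    simp only [List.foldl_cons]
    by_cases hx : w ∈ xs
    · exact ih _ _ _ hx
    · have : w = x := by rcases List.mem_cons.mp hw with h | h; exact h; exact absurd h hx
      subst this
      rw [pv_getD_foldl_insert_not_mem f xs _ _ _ hx]
      exact PySem.Dict.getD_insert_self _ _ _ _

-- B's fused pass splits into the two independent accumulators
theorem pv_alt_split (wtc ctw : PySem.Dict String (PySem.Dict String Int))
    (inv wtn : PySem.Dict String (List String)) (mincontexts : Int) (awl : List String) :
    awl.foldl (fun (s : PySem.Dict String (PySem.Dict String (List String)) × PySem.Dict String (PySem.Dict String Int)) word =>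
        let perWord := pvPerWordB wtc inv wtn mincontexts word
        (s.1.insert word perWord, perWord.keys.foldl (pvImpB ctw mincontexts word) s.2))
      (PySem.Dict.empty, PySem.Dict.empty)
    = (awl.foldl (fun W word => W.insert word (pvPerWordB wtc inv wtn mincontexts word)) PySem.Dict.empty,
       awl.foldl (fun I word => (pvPerWordB wtc inv wtn mincontexts word).keys.foldl (pvImpB ctw mincontexts word) I) PySem.Dict.empty) := by
  have h : (fun (s : PySem.Dict String (PySem.Dict String (List String)) × PySem.Dict String (PySem.Dict String Int)) word =>
        let perWord := pvPerWordB wtc inv wtn mincontexts word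
        (s.1.insert word perWord, perWord.keys.foldl (pvImpB ctw mincontexts word) s.2))
      = (fun s word =>
        ((fun (W : PySem.Dict String (PySem.Dict String (List String))) w => W.insert w (pvPerWordB wtc inv wtn mincontexts w)) s.1 word,
         (fun (I : PySem.Dict String (PySem.Dict String Int)) w => (pvPerWordB wtc inv wtn mincontexts w).keys.foldl (pvImpB ctw mincontexts w) I) s.2 word)) := rfl
  rw [h]
  exact PySem.List.foldl_prod_mk
    (f := fun (W : PySem.Dict String (PySem.Dict String (List String))) w => W.insert w (pvPerWordB wtc inv wtn mincontexts w))
    (g := fun (I : PySem.Dict String (PySem.Dict String Int)) w => (pvPerWordB wtc inv wtn mincontexts w).keys.foldl (pvImpB ctw mincontexts w) I)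
    awl _ _

-- ===== VERDICT (by name: the statement is the Claim_ definition above) =====
theorem compute_WordToSharedContextsOfNeighbors_spec : Claim_equal_compute_WordToSharedContextsOfNeighbors := by
  intro awl WtC WtN CtW mc _dom _pre
  unfold Spec_compute_WordToSharedContextsOfNeighbors
  simp only [compute_WordToSharedContextsOfNeighbors, compute_WordToSharedContextsOfNeighbors_alt]
  rw [pv_alt_split]
  simp only [pv_inner_eq, pv_imp_step_eq]
  have hI : awl.foldl (fun I word =>
        ((awl.foldl (fun W word => W.insert word (pvPerWordB (pvToDict2 WtC) (pvInvIdx (pvToDict2 CtW)) (PySem.Dict.ofList WtN) mc word)) PySem.Dict.empty).getD word PySem.Dict.empty).keys.foldl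
          (pvImpB (pvToDict2 CtW) mc word) I) PySem.Dict.empty
      = awl.foldl (fun I word =>
        (pvPerWordB (pvToDict2 WtC) (pvInvIdx (pvToDict2 CtW)) (PySem.Dict.ofList WtN) mc word).keys.foldl
          (pvImpB (pvToDict2 CtW) mc word) I) PySem.Dict.empty := by
    refine PySem.List.foldl_congr_mem' awl _ _ _ ?_
    intro word hw I
    rw [pv_getD_foldl_insert (fun w => pvPerWordB (pvToDict2 WtC) (pvInvIdx (pvToDict2 CtW)) (PySem.Dict.ofList WtN) mc w) awl _ _ _ hw]
  rw [hI]
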